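-- pv_equiv track=rewrite | github.com/cschatz/advent-of-code | advent/years/_2023/day9/solver.py | _diff_seq
-- ===== SOURCE A (Python) =====
-- def _diff_seq(seq):
--     out = []
--     all_zeros = True
--     for i in range(1, len(seq)):
--         delta = seq[i] - seq[i - 1]
--         if delta != 0:
--             all_zeros = False
--         out.append(delta)
--     return out, all_zeros
-- ===== SOURCE B (Python) =====
-- def _diff_seq(seq):
--     out = []
--     i = len(seq) - 1
--     while i >= 1:
--         out.append(seq[i] - seq[i - 1])
--         i -= 1
--     out.reverse()
--     return out, len(set(seq)) <= 1
-- ===== Notes on version B (the rewrite author's own statement) =====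
-- stated objective: alternative
-- what changed: Builds the difference list back-to-front with a descending while loop then reverses it, and computes the all-zeros flag without looking at any delta at all, via the set-cardinality characterisation len(set(seq)) <= 1 (all consecutive differences are zero iff the sequence is constant).
import Mathlib
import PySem

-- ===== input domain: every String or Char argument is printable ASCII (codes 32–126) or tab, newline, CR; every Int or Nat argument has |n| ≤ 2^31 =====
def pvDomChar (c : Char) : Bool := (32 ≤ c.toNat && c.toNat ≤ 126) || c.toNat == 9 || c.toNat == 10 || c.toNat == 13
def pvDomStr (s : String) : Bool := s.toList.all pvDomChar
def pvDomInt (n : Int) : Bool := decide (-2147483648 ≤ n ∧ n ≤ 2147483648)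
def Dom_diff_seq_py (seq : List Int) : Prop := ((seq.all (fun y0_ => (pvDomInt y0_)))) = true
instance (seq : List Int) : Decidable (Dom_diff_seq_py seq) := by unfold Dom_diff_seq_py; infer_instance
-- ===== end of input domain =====

-- B builds the difference list back-to-front (descending while loop, then reverse) and
-- computes the all-zeros flag from the INPUT, not the deltas: len(set(seq)) <= 1
-- (all consecutive differences vanish iff the sequence is constant); same O(n) cost.

-- ===== PORT A =====
-- literal port of A: for i in range(1, len(seq)): delta = seq[i] - seq[i-1]; flag; append
def diff_seq_py (seq : List Int) : List Int × Bool :=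
  (PySem.List.pyRange 1 (PySem.List.len seq) 1).foldl
    (fun (st : List Int × Bool) (i : Int) =>
      let delta := PySem.List.pyGetD seq i 0 - PySem.List.pyGetD seq (i - 1) 0
      (st.1 ++ [delta], if delta != 0 then false else st.2))
    ([], true)

-- ===== PORT B =====
-- literal port of B's while loop: while i >= 1: out.append(seq[i]-seq[i-1]); i -= 1
-- (the Nat argument is the loop variable i; i = 0 is the exit condition i >= 1 failing)
def diffSeqAltLoop (seq : List Int) : Nat → List Int → List Int
  | 0, out => out
  | j + 1, out =>
      diffSeqAltLoop seq j
        (out ++ [PySem.List.pyGetD seq ((j : Int) + 1) 0 - PySem.List.pyGetD seq (((j : Int) + 1) - 1) 0])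

-- port of B: backwards while loop, out.reverse(), flag = len(set(seq)) <= 1
def diff_seq_py_alt (seq : List Int) : List Int × Bool :=
  let out := (diffSeqAltLoop seq (seq.length - 1) []).reverse
  (out, decide ((PySem.Set.ofList seq).length ≤ 1))

-- ===== PRECONDITION & SPEC =====
def Spec_diff_seq_py (seq : List Int) (out : List Int × Bool) : Prop := out = diff_seq_py_alt seq
instance (seq : List Int) (out : List Int × Bool) : Decidable (Spec_diff_seq_py seq out) := by unfold Spec_diff_seq_py; infer_instance

-- ===== CLAIM (what is proved, stated in full; the proofs are below) =====
def Claim_equal_diff_seq_py : Prop := ∀ (seq : List Int), Dom_diff_seq_py seq → Spec_diff_seq_py seq (diff_seq_py seq)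

-- ===== LEMMAS AND PROOFS =====

-- structural form of the consecutive-difference list (proof device only)
def pvDiffs (a : Int) : List Int → List Int
  | [] => []
  | b :: l => (b - a) :: pvDiffs b l

-- A's loop from index k+1 on, given the suffix of seq from index k
theorem loopA (full : List Int) (l : List Int) :
    ∀ (a : Int) (k : Nat) (acc : List Int) (flag : Bool),
    full.drop k = a :: l →
    (PySem.List.pyRange ((k : Int) + 1) (full.length : Int) 1).foldl
      (fun (st : List Int × Bool) (i : Int) =>
        let delta := PySem.List.pyGetD full i 0 - PySem.List.pyGetD full (i - 1) 0
        (st.1 ++ [delta], if delta != 0 then false else st.2))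
      (acc, flag)
    = (acc ++ pvDiffs a l, flag && (pvDiffs a l).all (fun d => d == 0)) := by
  induction l with
  | nil =>
    intro a k acc flag h
    have hk : k < full.length := by
      by_contra hk
      simp [List.drop_eq_nil_of_le (le_of_not_gt hk)] at h
    have hlen : full.length = k + 1 := by
      have := congrArg List.length h
      simp [List.length_drop] at this
      omega
    rw [PySem.List.pyRange_one_eq_nil (by omega)]
    simp [pvDiffs]
  | cons b l ih =>
    intro a k acc flag h
    have hk : k < full.length := by
      by_contra hk
      simp [List.drop_eq_nil_of_le (le_of_not_gt hk)] at h
    have hlen : k + 1 < full.length := by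
      have := congrArg List.length h
      simp [List.length_drop] at this
      omega
    have ha : full.getD k 0 = a := by
      have : (full.drop k).getD 0 0 = a := by rw [h]; rfl
      simpa [List.getD, hk] using this
    have hb : full.getD (k + 1) 0 = b := by
      have : (full.drop k).getD 1 0 = b := by rw [h]; rfl
      simpa [List.getD, hlen] using this
    have hdrop : full.drop (k + 1) = b :: l := by
      have : (full.drop k).drop 1 = b :: l := by rw [h]; rfl
      simpa [List.drop_drop] using this
    rw [PySem.List.pyRange_one_cons (by exact_mod_cast hlen)]
    simp only [List.foldl_cons]
    have e1 : PySem.List.pyGetD full ((k : Int) + 1) 0 = b := by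
      have := PySem.List.pyGetD_natCast full (k + 1) 0
      push_cast at this ⊢
      rw [this, hb]
    have e2 : PySem.List.pyGetD full ((k : Int) + 1 - 1) 0 = a := by
      have := PySem.List.pyGetD_natCast full k 0
      simp only [add_sub_cancel_right]
      rw [this, ha]
    have := ih b (k + 1) (acc ++ [b - a]) (if (b - a) != 0 then false else flag) hdrop
    push_cast at this
    simp only [e1, e2]
    rw [this]
    simp only [pvDiffs, List.all_cons, List.append_assoc, List.singleton_append]
    by_cases hba : b - a = 0 <;> simp [hba]

-- B's descending loop appends the deltas at indices k+len l, …, k+1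
theorem loopB (full : List Int) (l : List Int) :
    ∀ (a : Int) (k : Nat) (acc : List Int),
    full.drop k = a :: l →
    diffSeqAltLoop full (k + l.length) acc = diffSeqAltLoop full k (acc ++ (pvDiffs a l).reverse) := by
  induction l with
  | nil => intro a k acc _; simp [pvDiffs]
  | cons b l ih =>
    intro a k acc h
    have hk : k < full.length := by
      by_contra hk
      simp [List.drop_eq_nil_of_le (le_of_not_gt hk)] at h
    have hlen : k + 1 < full.length := by
      have := congrArg List.length h
      simp [List.length_drop] at this
      omega
    have ha : full.getD k 0 = a := by
      have : (full.drop k).getD 0 0 = a := by rw [h]; rfl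
      simpa [List.getD, hk] using this
    have hb : full.getD (k + 1) 0 = b := by
      have : (full.drop k).getD 1 0 = b := by rw [h]; rfl
      simpa [List.getD, hlen] using this
    have hdrop : full.drop (k + 1) = b :: l := by
      have : (full.drop k).drop 1 = b :: l := by rw [h]; rfl
      simpa [List.drop_drop] using this
    have e1 : PySem.List.pyGetD full ((k : Int) + 1) 0 = b := by
      have := PySem.List.pyGetD_natCast full (k + 1) 0
      push_cast at this ⊢
      rw [this, hb]
    have e2 : PySem.List.pyGetD full ((k : Int) + 1 - 1) 0 = a := by
      have := PySem.List.pyGetD_natCast full k 0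
      simp only [add_sub_cancel_right]
      rw [this, ha]
    have step : diffSeqAltLoop full (k + 1) (acc ++ (pvDiffs b l).reverse)
        = diffSeqAltLoop full k (acc ++ (pvDiffs b l).reverse ++ [b - a]) := by
      simp only [diffSeqAltLoop, e1, e2]
    have := ih b (k + 1) acc hdrop
    calc diffSeqAltLoop full (k + (b :: l).length) acc
        = diffSeqAltLoop full ((k + 1) + l.length) acc := by
          simp only [List.length_cons]; ring_nf
      _ = diffSeqAltLoop full (k + 1) (acc ++ (pvDiffs b l).reverse) := this
      _ = diffSeqAltLoop full k (acc ++ (pvDiffs b l).reverse ++ [b - a]) := step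
      _ = diffSeqAltLoop full k (acc ++ (pvDiffs a (b :: l)).reverse) := by
          simp [pvDiffs, List.append_assoc]

-- all deltas vanish iff the tail is constant
theorem pvDiffs_all_zero (a : Int) (l : List Int) :
    ((pvDiffs a l).all (fun d => d == 0) = true) ↔ (∀ x ∈ l, x = a) := by
  induction l generalizing a with
  | nil => simp [pvDiffs]
  | cons b l ih =>
    simp only [pvDiffs, List.all_cons, Bool.and_eq_true, beq_iff_eq, sub_eq_zero, ih,
      List.mem_cons, forall_eq_or_imp]
    constructor
    · rintro ⟨rfl, h⟩; exact ⟨rfl, h⟩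
    · rintro ⟨rfl, h⟩; exact ⟨rfl, h⟩

-- the set-cardinality flag agrees with "the tail is constant"
theorem setCard_le_one (a : Int) (l : List Int) :
    ((PySem.Set.ofList (a :: l)).length ≤ 1) ↔ (∀ x ∈ l, x = a) := by
  constructor
  · intro h x hx
    have hxmem : x ∈ PySem.Set.ofList (a :: l) := by
      rw [PySem.Set.mem_ofList]; exact List.mem_cons_of_mem a hx
    have hamem : a ∈ PySem.Set.ofList (a :: l) := by
      rw [PySem.Set.mem_ofList]; exact List.mem_cons_self
    cases hs : PySem.Set.ofList (a :: l) with
    | nil => rw [hs] at hamem; simp at hamem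
    | cons y t =>
      have ht : t = [] := by
        rw [hs] at h
        simp only [List.length_cons] at h
        exact List.eq_nil_of_length_eq_zero (by omega)
      rw [hs, ht] at hxmem hamem
      simp at hxmem hamem
      rw [hxmem, hamem]
  · intro h
    have hsub : PySem.Set.ofList (a :: l) ⊆ [a] := by
      intro x hx
      rw [PySem.Set.mem_ofList] at hx
      simp only [List.mem_cons] at hx
      rcases hx with hx | hx
      · simp [hx]
      · simp [h x hx]
    have hnd : (PySem.Set.ofList (a :: l)).Nodup := PySem.Set.nodup_ofList _
    cases hs : PySem.Set.ofList (a :: l) with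
    | nil => simp
    | cons y t =>
      cases t with
      | nil => simp
      | cons z u =>
        exfalso
        rw [hs] at hsub hnd
        have hy : y = a := by simpa using hsub (List.mem_cons_self)
        have hz : z = a := by simpa using hsub (List.mem_cons_of_mem y List.mem_cons_self)
        rw [hy, hz] at hnd
        simp at hnd

-- ===== VERDICT (by name: the statement is the Claim_ definition above) =====
theorem diff_seq_py_spec : Claim_equal_diff_seq_py := by
  intro seq _
  unfold Spec_diff_seq_py diff_seq_py diff_seq_py_alt
  cases seq with
  | nil => rfl
  | cons a l =>
    have h0 : (a :: l).drop 0 = a :: l := rfl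
    have hA := loopA (a :: l) l a 0 [] true h0
    simp only [Int.natCast_zero, zero_add, List.length_cons] at hA
    have hB := loopB (a :: l) l a 0 [] h0
    simp only [Nat.zero_add, List.nil_append] at hB
    simp only [PySem.List.len, List.length_cons, Nat.add_sub_cancel]
    rw [hA, hB]
    simp only [diffSeqAltLoop, List.nil_append, List.reverse_reverse, Bool.true_and]
    refine Prod.ext rfl ?_
    by_cases hc : ∀ x ∈ l, x = a
    · rw [(pvDiffs_all_zero a l).mpr hc, decide_eq_true ((setCard_le_one a l).mpr hc)]
    · have h1 : ¬ ((pvDiffs a l).all (fun d => d == 0) = true) := fun h => hc ((pvDiffs_all_zero a l).mp h)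
      rw [Bool.not_eq_true] at h1
      rw [h1, decide_eq_false (fun h => hc ((setCard_le_one a l).mp h))]
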